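-- pv_equiv track=rewrite | github.com/ShanBirch/shanbot | webhook3.py | _user_has_agreed_to_challenge
-- ===== SOURCE A (Python) =====
-- def _user_has_agreed_to_challenge(conv_history: list[dict]) -> bool:
--     """Return True if user gave an affirmative answer after Shannon's soft intro."""
--     intro_idx = -1
--     for idx, entry in enumerate(conv_history):
--         if entry.get('type') == 'ai':
--             txt = entry.get('text', '').lower()
--             if any(p in txt for p in [
--                 'would you be interested',
--                 'interested in hearing',
--                 'keen to hear',
--                 'keen to find out',
--                     'would you be keen']):
--                 intro_idx = idx
--     if intro_idx == -1:
--         return False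
--     affirm_words = ['yes', 'yeah', 'yep', 'sure', 'keen', 'interested',
--                     'sounds good', 'sounds great', 'ok', 'okay', 'absolutely']
--     for entry in conv_history[intro_idx + 1:]:
--         if entry.get('type') == 'user':
--             txt = entry.get('text', '').lower()
--             if any(w in txt for w in affirm_words):
--                 return True
--             if any(w in txt for w in ['no', 'not', 'later', 'maybe']):
--                 return False
--     return False
-- ===== SOURCE B (Python) =====
-- def _user_has_agreed_to_challenge(conv_history: list[dict]) -> bool:
--     """Single forward pass: track (result, awaiting) instead of locating the last intro first."""
--     intro_phrases = ['would you be interested', 'interested in hearing',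
--                      'keen to hear', 'keen to find out', 'would you be keen']
--     affirm_words = ['yes', 'yeah', 'yep', 'sure', 'keen', 'interested',
--                     'sounds good', 'sounds great', 'ok', 'okay', 'absolutely']
--     neg_words = ['no', 'not', 'later', 'maybe']
--     result = False
--     awaiting = False
--     for entry in conv_history:
--         t = entry.get('type')
--         txt = entry.get('text', '').lower()
--         if t == 'ai' and any(p in txt for p in intro_phrases):
--             result, awaiting = False, True
--         elif t == 'user' and awaiting:
--             if any(w in txt for w in affirm_words):
--                 result, awaiting = True, False
--             elif any(w in txt for w in neg_words):
--                 result, awaiting = False, False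
--     return result
-- ===== Notes on version B (the rewrite author's own statement) =====
-- stated objective: simpler
-- what changed: Replaced A's two-phase scheme (enumerate to find the index of the last intro message, then re-scan the slice after it) by a single forward pass over the history maintaining a (result, awaiting) state that any new intro resets.
import Mathlib
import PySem

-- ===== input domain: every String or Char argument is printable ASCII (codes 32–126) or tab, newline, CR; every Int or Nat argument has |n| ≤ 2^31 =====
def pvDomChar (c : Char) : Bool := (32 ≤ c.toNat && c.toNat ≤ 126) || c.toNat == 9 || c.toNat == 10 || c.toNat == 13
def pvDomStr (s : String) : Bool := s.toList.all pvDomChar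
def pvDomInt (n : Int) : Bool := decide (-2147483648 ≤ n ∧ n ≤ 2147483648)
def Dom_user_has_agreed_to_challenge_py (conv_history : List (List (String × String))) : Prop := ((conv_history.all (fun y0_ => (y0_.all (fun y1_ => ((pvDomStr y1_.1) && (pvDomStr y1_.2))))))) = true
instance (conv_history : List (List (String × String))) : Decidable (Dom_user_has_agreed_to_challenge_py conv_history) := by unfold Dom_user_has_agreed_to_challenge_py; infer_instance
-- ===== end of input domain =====

-- B replaces A's two-phase "find last intro index, then rescan the suffix" by one forward
-- pass with a (result, awaiting) state; objective: simpler (single pass, same word lists).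

-- shared word lists (module constants of both programs)
def pvIntroPhrases : List String :=
  ["would you be interested", "interested in hearing", "keen to hear",
   "keen to find out", "would you be keen"]
def pvAffirmWords : List String :=
  ["yes", "yeah", "yep", "sure", "keen", "interested",
   "sounds good", "sounds great", "ok", "okay", "absolutely"]
def pvNegWords : List String := ["no", "not", "later", "maybe"]

-- ===== PORT A =====
-- second for-loop of A (early returns become structural recursion)
def pvScanAfterIntro : List (List (String × String)) → Bool
  | [] => false
  | entry :: rest =>
    if (PySem.Dict.mk entry).get? "type" == some "user" then
      let txt := PySem.Str.lower ((PySem.Dict.mk entry).getD "text" "")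
      if pvAffirmWords.any (fun w => PySem.Str.isIn w txt) then true
      else if pvNegWords.any (fun w => PySem.Str.isIn w txt) then false
      else pvScanAfterIntro rest
    else pvScanAfterIntro rest

def user_has_agreed_to_challenge_py (conv_history : List (List (String × String))) : Bool :=
  let intro_idx : Int := (PySem.List.enumerate conv_history 0).foldl
    (fun acc p =>
      if (PySem.Dict.mk p.2).get? "type" == some "ai" then
        let txt := PySem.Str.lower ((PySem.Dict.mk p.2).getD "text" "")
        if pvIntroPhrases.any (fun ph => PySem.Str.isIn ph txt) then p.1 else acc
      else acc) (-1)
  if intro_idx == -1 then false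
  else pvScanAfterIntro (PySem.List.slice conv_history (some (intro_idx + 1)) none)

-- ===== PORT B =====
-- loop body of Source B: state = (result, awaiting)
def pvStep (st : Bool × Bool) (entry : List (String × String)) : Bool × Bool :=
  let t := (PySem.Dict.mk entry).get? "type"
  let txt := PySem.Str.lower ((PySem.Dict.mk entry).getD "text" "")
  if t == some "ai" && pvIntroPhrases.any (fun p => PySem.Str.isIn p txt) then
    (false, true)
  else if t == some "user" && st.2 then
    if pvAffirmWords.any (fun w => PySem.Str.isIn w txt) then (true, false)
    else if pvNegWords.any (fun w => PySem.Str.isIn w txt) then (false, false)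
    else st
  else st

def user_has_agreed_to_challenge_py_alt (conv_history : List (List (String × String))) : Bool :=
  (conv_history.foldl pvStep (false, false)).1

-- ===== PRECONDITION & SPEC =====
def Spec_user_has_agreed_to_challenge_py (conv_history : List (List (String × String))) (out : Bool) : Prop := out = user_has_agreed_to_challenge_py_alt conv_history
instance (conv_history : List (List (String × String))) (out : Bool) : Decidable (Spec_user_has_agreed_to_challenge_py conv_history out) := by unfold Spec_user_has_agreed_to_challenge_py; infer_instance

-- ===== CLAIM (what is proved, stated in full; the proofs are below) =====
def Claim_equal_user_has_agreed_to_challenge_py : Prop := ∀ (conv_history : List (List (String × String))), Dom_user_has_agreed_to_challenge_py conv_history → Spec_user_has_agreed_to_challenge_py conv_history (user_has_agreed_to_challenge_py conv_history)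

-- ===== LEMMAS AND PROOFS =====
def pvIsIntro (e : List (String × String)) : Bool :=
  (PySem.Dict.mk e).get? "type" == some "ai" &&
    pvIntroPhrases.any (fun p => PySem.Str.isIn p (PySem.Str.lower ((PySem.Dict.mk e).getD "text" "")))
def pvIsUser (e : List (String × String)) : Bool :=
  (PySem.Dict.mk e).get? "type" == some "user"
def pvIsAff (e : List (String × String)) : Bool :=
  pvAffirmWords.any (fun w => PySem.Str.isIn w (PySem.Str.lower ((PySem.Dict.mk e).getD "text" "")))
def pvIsNeg (e : List (String × String)) : Bool :=
  pvNegWords.any (fun w => PySem.Str.isIn w (PySem.Str.lower ((PySem.Dict.mk e).getD "text" "")))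
def pvHasIntro (l : List (List (String × String))) : Bool := l.any pvIsIntro
def pvLastPos : List (List (String × String)) → Nat
  | [] => 0
  | _ :: r => if pvHasIntro r then pvLastPos r + 1 else 0
-- the canonical post-intro scan (awaiting a user answer); r = current result
def pvScanU : List (List (String × String)) → Bool → Bool
  | [], r => r
  | e :: rest, r =>
    if pvIsUser e then
      if pvIsAff e then true
      else if pvIsNeg e then false
      else pvScanU rest r
    else pvScanU rest r

theorem pvHasIntro_cons (e : List (String × String)) (rest : List (List (String × String))) :
    pvHasIntro (e :: rest) = (pvIsIntro e || pvHasIntro rest) := rfl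

theorem pvScanU_cons (e : List (String × String)) (rest : List (List (String × String))) (r : Bool) :
    pvScanU (e :: rest) r =
      if pvIsUser e then
        if pvIsAff e then true
        else if pvIsNeg e then false
        else pvScanU rest r
      else pvScanU rest r := rfl

theorem pvStep_eq (st : Bool × Bool) (e : List (String × String)) :
    pvStep st e =
      if pvIsIntro e then (false, true)
      else if pvIsUser e && st.2 then
        if pvIsAff e then (true, false)
        else if pvIsNeg e then (false, false)
        else st
      else st := rfl

theorem pvScanAfterIntro_eq (l : List (List (String × String))) :
    pvScanAfterIntro l = pvScanU l false := by
  induction l with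
  | nil => rfl
  | cons e rest ih =>
    show (if pvIsUser e then
        if pvIsAff e then true else if pvIsNeg e then false else pvScanAfterIntro rest
      else pvScanAfterIntro rest) = pvScanU (e :: rest) false
    rw [ih, pvScanU_cons]

theorem pvIntroStep_eq (e : List (String × String)) (k acc : Int) :
    (if (PySem.Dict.mk e).get? "type" == some "ai" then
       if pvIntroPhrases.any (fun ph => PySem.Str.isIn ph
           (PySem.Str.lower ((PySem.Dict.mk e).getD "text" ""))) then k else acc
     else acc) = if pvIsIntro e then k else acc := by
  cases h1 : ((PySem.Dict.mk e).get? "type" == some "ai") <;>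
    cases h2 : (pvIntroPhrases.any (fun ph => PySem.Str.isIn ph
        (PySem.Str.lower ((PySem.Dict.mk e).getD "text" "")))) <;>
    simp only [pvIsIntro, h1, h2, Bool.true_and, Bool.false_and, Bool.and_self] <;> simp

theorem pvFoldIntro (l : List (List (String × String))) (k acc : Int) :
    (PySem.List.enumerate l k).foldl
      (fun acc p =>
        if (PySem.Dict.mk p.2).get? "type" == some "ai" then
          let txt := PySem.Str.lower ((PySem.Dict.mk p.2).getD "text" "")
          if pvIntroPhrases.any (fun ph => PySem.Str.isIn ph txt) then p.1 else acc
        else acc) acc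
    = if pvHasIntro l then k + (pvLastPos l : Int) else acc := by
  induction l generalizing k acc with
  | nil => simp [PySem.List.enumerate_nil, pvHasIntro]
  | cons e rest ih =>
    rw [PySem.List.enumerate_cons]
    simp only [List.foldl_cons]
    rw [ih, pvIntroStep_eq e k acc, pvHasIntro_cons]
    cases he : pvIsIntro e <;> cases hr : pvHasIntro rest <;>
      simp [pvLastPos, hr] <;> push_cast <;> ring

theorem pvFoldStep (l : List (List (String × String))) (r w : Bool) :
    (l.foldl pvStep (r, w)).1
      = if pvHasIntro l then pvScanU (l.drop (pvLastPos l + 1)) false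
        else if w then pvScanU l r else r := by
  induction l generalizing r w with
  | nil => cases w <;> simp [pvHasIntro, pvScanU]
  | cons e rest ih =>
    have hlast : pvLastPos (e :: rest)
        = if pvHasIntro rest then pvLastPos rest + 1 else 0 := rfl
    simp only [List.foldl_cons, pvStep_eq, pvHasIntro_cons, hlast]
    cases he : pvIsIntro e <;> cases hu : pvIsUser e <;> cases hw : w <;>
      cases ha : pvIsAff e <;> cases hn : pvIsNeg e <;>
      cases hr : pvHasIntro rest <;>
      simp [he, hu, hw, ha, hn, hr, ih, pvScanU_cons, List.drop_succ_cons]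

-- ===== VERDICT (by name: the statement is the Claim_ definition above) =====
theorem user_has_agreed_to_challenge_py_spec : Claim_equal_user_has_agreed_to_challenge_py := by
  unfold Claim_equal_user_has_agreed_to_challenge_py
  intro conv _
  unfold Spec_user_has_agreed_to_challenge_py
  unfold user_has_agreed_to_challenge_py user_has_agreed_to_challenge_py_alt
  rw [pvFoldIntro conv 0 (-1), pvFoldStep conv false false]
  cases h : pvHasIntro conv
  · simp [h]
  · have hne : (((pvLastPos conv : Int) == -1)) = false := by simp
    have hsl : PySem.List.slice conv (some ((pvLastPos conv : Int) + 1)) none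
        = conv.drop (pvLastPos conv + 1) := by
      have := PySem.List.slice_from_natCast conv (pvLastPos conv + 1)
      push_cast at this; exact this
    simp [h, hne, hsl, pvScanAfterIntro_eq]
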